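-- pv_equiv track=rewrite | github.com/selfreferencing/erdos-ternary-digits | analyze_erdos_automaton.py | first_digit_2_position
-- ===== SOURCE A (Python) =====
-- def first_digit_2_position(n):
--     """Find the position of the first digit 2 (from right), or -1 if none."""
--     pos = 0
--     while n > 0:
--         if n % 3 == 2:
--             return pos
--         n //= 3
--         pos += 1
--     return -1
-- ===== SOURCE B (Python) =====
-- def first_digit_2_position(n):
--     """Find the position of the first digit 2 (from right), or -1 if none."""
--     if n <= 0:
--         return -1
--     s = ""
--     while n > 0:
--         s = str(n % 3) + s
--         n //= 3
--     idx = s.rfind('2')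
--     return -1 if idx == -1 else len(s) - 1 - idx
-- ===== Notes on version B (the rewrite author's own statement) =====
-- stated objective: alternative
-- what changed: B builds the full base-3 representation as a big-endian string first and then locates the lowest occurrence of the target digit with a single rfind over that string, instead of A's short-circuiting digit-peeling loop that tests each remainder as it goes.
import Mathlib
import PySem

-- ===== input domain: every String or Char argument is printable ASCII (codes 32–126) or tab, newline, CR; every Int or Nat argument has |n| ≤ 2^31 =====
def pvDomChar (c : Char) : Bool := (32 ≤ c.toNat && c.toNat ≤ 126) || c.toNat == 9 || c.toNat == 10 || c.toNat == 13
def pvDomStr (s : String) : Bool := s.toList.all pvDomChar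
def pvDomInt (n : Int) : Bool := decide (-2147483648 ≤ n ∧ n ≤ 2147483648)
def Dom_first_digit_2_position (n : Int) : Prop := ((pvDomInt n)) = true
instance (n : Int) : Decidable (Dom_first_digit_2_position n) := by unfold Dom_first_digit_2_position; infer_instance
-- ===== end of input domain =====

-- B builds the whole base-3 representation as a big-endian string, then one rfind('2') locates
-- the lowest digit 2; A peels digits with a short-circuiting loop. Alternative decomposition, same cost.


-- termination helper for both ports' loops (n //= 3 shrinks a positive n)
theorem pvFdivLt (n : Int) (h : 0 < n) : (PySem.Int.floordiv n 3).toNat < n.toNat := by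
  have h3 : PySem.Int.floordiv n 3 = n / 3 := by
    simp [PySem.Int.floordiv, Int.fdiv_eq_ediv]
  omega

-- ===== PORT A =====
-- the while-loop of A: while n > 0: if n % 3 == 2: return pos; n //= 3; pos += 1
def fdpLoop (n : Int) (pos : Int) : Int :=
  if h : 0 < n then
    if PySem.Int.mod n 3 = 2 then pos
    else fdpLoop (PySem.Int.floordiv n 3) (pos + 1)
  else -1
termination_by n.toNat
decreasing_by exact pvFdivLt n h

def first_digit_2_position (n : Int) : Int := fdpLoop n 0

-- ===== PORT B =====
-- B's while-loop: s = str(n % 3) + s; n //= 3   (the Python string kept as List Char)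
def fdpBuild (n : Int) (acc : List Char) : List Char :=
  if h : 0 < n then
    fdpBuild (PySem.Int.floordiv n 3) ((PySem.Int.toStr (PySem.Int.mod n 3)).toList ++ acc)
  else acc
termination_by n.toNat
decreasing_by exact pvFdivLt n h

def first_digit_2_position_alt (n : Int) : Int :=
  if n ≤ 0 then -1
  else
    let s := fdpBuild n []
    let idx := PySem.Chars.rfind s ['2']
    if idx = -1 then -1 else (s.length : Int) - 1 - idx

-- ===== PRECONDITION & SPEC =====
def Spec_first_digit_2_position (n : Int) (out : Int) : Prop := out = first_digit_2_position_alt n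
instance (n : Int) (out : Int) : Decidable (Spec_first_digit_2_position n out) := by unfold Spec_first_digit_2_position; infer_instance

-- ===== CLAIM (what is proved, stated in full; the proofs are below) =====
def Claim_equal_first_digit_2_position : Prop := ∀ (n : Int), Dom_first_digit_2_position n → Spec_first_digit_2_position n (first_digit_2_position n)

-- ===== LEMMAS AND PROOFS =====

theorem go_zero (s sub : List Char) :
    PySem.Chars.rfind.go s sub 0 = if sub.isPrefixOf s then 0 else -1 := rfl

theorem go_succ (s sub : List Char) (j : Nat) :
    PySem.Chars.rfind.go s sub (j + 1) =
      if sub.isPrefixOf (s.drop (j + 1)) then ((j : Int) + 1) else PySem.Chars.rfind.go s sub j := by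
  rfl

theorem prefix2 (h : Char) (t : List Char) :
    List.isPrefixOf ['2'] (h :: t) = (h == '2') := by
  simp [List.isPrefixOf, eq_comm]

theorem go_append (c : Char) (s : List Char) :
    ∀ k, k < s.length → PySem.Chars.rfind.go (s ++ [c]) ['2'] k = PySem.Chars.rfind.go s ['2'] k := by
  intro k
  induction k with
  | zero =>
    intro hk
    obtain ⟨h, t, rfl⟩ := List.exists_cons_of_ne_nil (List.ne_nil_of_length_pos hk)
    simp [go_zero, prefix2]
  | succ j ih =>
    intro hk
    have hd : (s ++ [c]).drop (j + 1) = s.drop (j + 1) ++ [c] :=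
      List.drop_append_of_le_length (by omega)
    have hne : s.drop (j + 1) ≠ [] := by
      simpa [List.drop_eq_nil_iff] using (by omega : ¬ s.length ≤ j + 1)
    obtain ⟨h, t, he⟩ := List.exists_cons_of_ne_nil hne
    rw [go_succ, go_succ, hd, he, List.cons_append, prefix2, prefix2, ih (by omega)]

theorem rfind_append (s : List Char) (c : Char) :
    PySem.Chars.rfind (s ++ [c]) ['2'] =
      if c = '2' then (s.length : Int) else PySem.Chars.rfind s ['2'] := by
  unfold PySem.Chars.rfind
  rw [List.length_append, List.length_singleton]
  cases hs : s.length with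
  | zero =>
    obtain rfl : s = [] := List.eq_nil_of_length_eq_zero hs
    rw [List.nil_append, go_succ, go_zero, go_zero,
      show (['2'] : List Char).isPrefixOf ([c].drop (0 + 1)) = false from rfl,
      prefix2,
      show (['2'] : List Char).isPrefixOf [] = false from rfl]
    simp only [Bool.false_eq_true, if_false]
    by_cases hc : c = '2'
    · simp [hc]
    · have hc' : (c == '2') = false := by simp [hc]
      rw [hc']
      simp [hc]
  | succ m =>
    rw [go_succ,
      show (s ++ [c]).drop (m + 1 + 1) = [] from List.drop_eq_nil_iff.mpr (by simp; omega),
      show (['2'] : List Char).isPrefixOf [] = false from rfl]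
    simp only [Bool.false_eq_true, if_false]
    rw [go_succ,
      show (s ++ [c]).drop (m + 1) = [c] from by
        rw [List.drop_append_of_le_length (by omega), List.drop_eq_nil_iff.mpr (by omega),
          List.nil_append],
      prefix2,
      go_succ s,
      show s.drop (m + 1) = [] from List.drop_eq_nil_iff.mpr (by omega),
      show (['2'] : List Char).isPrefixOf [] = false from rfl]
    simp only [Bool.false_eq_true, if_false]
    by_cases hc : c = '2'
    · simp [hc]
    · have hc' : (c == '2') = false := by simp [hc]
      rw [hc']
      simp only [Bool.false_eq_true, if_false, if_neg hc]
      exact go_append c s m (by omega)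

theorem build_acc (n : Int) (acc : List Char) :
    fdpBuild n acc = fdpBuild n [] ++ acc := by
  by_cases h : 0 < n
  · conv_lhs => rw [fdpBuild]
    conv_rhs => rw [fdpBuild]
    rw [dif_pos h, dif_pos h,
      build_acc (PySem.Int.floordiv n 3) ((PySem.Int.toStr (PySem.Int.mod n 3)).toList ++ acc),
      build_acc (PySem.Int.floordiv n 3) ((PySem.Int.toStr (PySem.Int.mod n 3)).toList ++ [])]
    simp [List.append_assoc]
  · conv_lhs => rw [fdpBuild]
    conv_rhs => rw [fdpBuild]
    rw [dif_neg h, dif_neg h]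
    simp
termination_by n.toNat
decreasing_by all_goals exact pvFdivLt n h

theorem mod3_cases (n : Int) :
    PySem.Int.mod n 3 = 0 ∨ PySem.Int.mod n 3 = 1 ∨ PySem.Int.mod n 3 = 2 := by
  have h3 : PySem.Int.mod n 3 = n % 3 := by
    simp [PySem.Int.mod, Int.fmod_eq_emod]
  omega

theorem build_step (n : Int) (h : 0 < n) :
    fdpBuild n [] = fdpBuild (PySem.Int.floordiv n 3) [] ++
      [if PySem.Int.mod n 3 = 2 then '2' else if PySem.Int.mod n 3 = 1 then '1' else '0'] := by
  conv_lhs => rw [fdpBuild]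
  rw [dif_pos h, build_acc]
  congr 1
  rcases mod3_cases n with hm | hm | hm <;> rw [hm] <;> decide

theorem main_lemma (n : Int) (h : 0 < n) (pos : Int) :
    fdpLoop n pos =
      (if PySem.Chars.rfind (fdpBuild n []) ['2'] = -1 then -1
       else pos + (((fdpBuild n []).length : Int) - 1 - PySem.Chars.rfind (fdpBuild n []) ['2'])) := by
  rw [build_step n h, rfind_append]
  by_cases hm : PySem.Int.mod n 3 = 2
  · have hcc : (if PySem.Int.mod n 3 = 2 then '2' else if PySem.Int.mod n 3 = 1 then '1' else '0') = '2' :=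
      if_pos hm
    rw [hcc]
    conv_lhs => rw [fdpLoop]
    rw [dif_pos h, if_pos hm, if_pos (rfl : '2' = '2'),
      if_neg (by
        have := Int.natCast_nonneg (fdpBuild (PySem.Int.floordiv n 3) []).length
        omega)]
    simp only [List.length_append, List.length_singleton]
    push_cast
    ring
  · conv_lhs => rw [fdpLoop]
    rw [dif_pos h, if_neg hm]
    have hc : (if PySem.Int.mod n 3 = 2 then '2' else if PySem.Int.mod n 3 = 1 then '1' else '0') ≠ '2' := by
      rcases mod3_cases n with h0 | h0 | h0
      · rw [h0]; decide
      · rw [h0]; decide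
      · exact absurd h0 hm
    rw [if_neg hc]
    by_cases hq : 0 < PySem.Int.floordiv n 3
    · rw [main_lemma (PySem.Int.floordiv n 3) hq (pos + 1)]
      by_cases hr : PySem.Chars.rfind (fdpBuild (PySem.Int.floordiv n 3) []) ['2'] = -1
      · rw [if_pos hr, if_pos hr]
      · rw [if_neg hr, if_neg hr]
        simp only [List.length_append, List.length_singleton]
        push_cast
        ring
    · have hb : fdpBuild (PySem.Int.floordiv n 3) [] = [] := by
        rw [fdpBuild, dif_neg hq]
      rw [fdpLoop, dif_neg hq, hb]
      norm_num [PySem.Chars.rfind, go_zero, List.isPrefixOf]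
termination_by n.toNat
decreasing_by exact pvFdivLt n h

-- ===== VERDICT (by name: the statement is the Claim_ definition above) =====
theorem first_digit_2_position_spec : Claim_equal_first_digit_2_position := by
  intro n _
  unfold Spec_first_digit_2_position first_digit_2_position first_digit_2_position_alt
  by_cases h : n ≤ 0
  · rw [if_pos h, fdpLoop, dif_neg (by omega)]
  · rw [if_neg h, main_lemma n (by omega) 0]
    by_cases hr : PySem.Chars.rfind (fdpBuild n []) ['2'] = -1
    · simp [hr]
    · rw [if_neg hr]
      simp only [if_neg hr]
      ring
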